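-- pv_equiv track=rewrite | github.com/AnonymousWorks/OPERA | analyze_results/_cal_APFD_icse.py | get_accumulate_bug_num
-- ===== SOURCE A (Python) =====
-- def get_accumulate_bug_num(bug_line_list, test_case_num):
--     cumulative_bug_list = []
--     cumulative_bug_num = 0
--     for i in range(test_case_num):
--         if i in bug_line_list:
--             cumulative_bug_num += bug_line_list.count(i)
--         cumulative_bug_list.append(cumulative_bug_num)
--
--     return cumulative_bug_list
-- ===== SOURCE B (Python) =====
-- def _bisect_right(a, x):
--     # first index j with x < a[j], by binary search on the sorted list a
--     lo, hi = 0, len(a)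
--     while lo < hi:
--         mid = (lo + hi) // 2
--         if x < a[mid]:
--             hi = mid
--         else:
--             lo = mid + 1
--     return lo
--
--
-- def _bisect_left(a, x):
--     # first index j with x <= a[j], by binary search on the sorted list a
--     lo, hi = 0, len(a)
--     while lo < hi:
--         mid = (lo + hi) // 2
--         if a[mid] < x:
--             lo = mid + 1
--         else:
--             hi = mid
--     return lo
--
--
-- def get_accumulate_bug_num(bug_line_list, test_case_num):
--     # Sort once; each cumulative value is then the number of bug entries v with
--     # 0 <= v <= i, answered by two binary searches on the sorted copy.
--     s = sorted(bug_line_list)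
--     base = _bisect_left(s, 0)
--     return [_bisect_right(s, i) - base for i in range(test_case_num)]
-- ===== Notes on version B (the rewrite author's own statement) =====
-- stated objective: faster
-- what changed: Sorts the bug list once and answers each cumulative query with two hand-written binary searches (count of elements in [0,i]) instead of A's per-index membership test plus full .count() scan.
import Mathlib
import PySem

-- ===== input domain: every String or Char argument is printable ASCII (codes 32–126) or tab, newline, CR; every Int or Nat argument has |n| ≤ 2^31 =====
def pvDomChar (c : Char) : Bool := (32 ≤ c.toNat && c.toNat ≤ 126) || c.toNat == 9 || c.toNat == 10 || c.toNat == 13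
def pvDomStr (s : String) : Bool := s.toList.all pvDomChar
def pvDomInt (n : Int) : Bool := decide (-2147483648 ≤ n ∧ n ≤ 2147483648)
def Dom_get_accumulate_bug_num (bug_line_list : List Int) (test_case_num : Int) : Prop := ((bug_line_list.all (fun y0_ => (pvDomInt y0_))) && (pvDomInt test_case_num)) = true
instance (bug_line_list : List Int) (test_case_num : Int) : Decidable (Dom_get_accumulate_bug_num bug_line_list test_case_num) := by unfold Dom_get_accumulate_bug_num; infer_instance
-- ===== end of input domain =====

-- B sorts the list once and answers each cumulative count with two hand-written
-- binary searches, instead of A's per-index membership test + .count() scan (faster).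

-- ===== PORT A =====
def get_accumulate_bug_num (bug_line_list : List Int) (test_case_num : Int) : List Int :=
  ((PySem.List.pyRange 0 test_case_num 1).foldl
    (fun (st : List Int × Int) i =>
      let num : Int :=
        if bug_line_list.contains i then st.2 + (PySem.List.count bug_line_list i : Int) else st.2
      (st.1 ++ [num], num)) ([], 0)).1

-- ===== PORT B =====
-- `a[mid]` is always in range (0 ≤ lo ≤ mid < hi ≤ len), so `getD _ _ 0` is exact here.
def pvBisectRight (a : List Int) (x : Int) (lo hi : Nat) : Nat :=
  if lo < hi then
    let mid := (lo + hi) / 2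
    if x < a.getD mid 0 then pvBisectRight a x lo mid else pvBisectRight a x (mid + 1) hi
  else lo
termination_by hi - lo
decreasing_by all_goals omega

def pvBisectLeft (a : List Int) (x : Int) (lo hi : Nat) : Nat :=
  if lo < hi then
    let mid := (lo + hi) / 2
    if a.getD mid 0 < x then pvBisectLeft a x (mid + 1) hi else pvBisectLeft a x lo mid
  else lo
termination_by hi - lo
decreasing_by all_goals omega

def get_accumulate_bug_num_alt (bug_line_list : List Int) (test_case_num : Int) : List Int :=
  let s := PySem.List.sorted bug_line_list (fun v => v) false
  let base : Int := (pvBisectLeft s 0 0 s.length : Int)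
  (PySem.List.pyRange 0 test_case_num 1).map
    (fun i => (pvBisectRight s i 0 s.length : Int) - base)

-- ===== PRECONDITION & SPEC =====
def Spec_get_accumulate_bug_num (bug_line_list : List Int) (test_case_num : Int) (out : List Int) : Prop := out = get_accumulate_bug_num_alt bug_line_list test_case_num
instance (bug_line_list : List Int) (test_case_num : Int) (out : List Int) : Decidable (Spec_get_accumulate_bug_num bug_line_list test_case_num out) := by unfold Spec_get_accumulate_bug_num; infer_instance

-- ===== CLAIM (what is proved, stated in full; the proofs are below) =====
def Claim_equal_get_accumulate_bug_num : Prop := ∀ (bug_line_list : List Int) (test_case_num : Int), Dom_get_accumulate_bug_num bug_line_list test_case_num → Spec_get_accumulate_bug_num bug_line_list test_case_num (get_accumulate_bug_num bug_line_list test_case_num)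

-- ===== LEMMAS AND PROOFS =====

-- number of elements of l lying in [0, m)
def cntLt (l : List Int) (m : Int) : Int :=
  (l.countP (fun v => decide (0 ≤ v ∧ v < m)) : Int)

lemma cntLt_zero (l : List Int) : cntLt l 0 = 0 := by
  unfold cntLt
  norm_cast
  apply List.countP_eq_zero.mpr
  intro a _
  simp only [decide_eq_true_eq]
  omega

lemma cnt_succ (l : List Int) (m : Int) (hm : 0 ≤ m) :
    cntLt l (m + 1) = cntLt l m + (List.count m l : Int) := by
  induction l with
  | nil => simp [cntLt]
  | cons a t ih =>
    simp only [cntLt, List.countP_cons, List.count_cons, decide_eq_true_eq, beq_iff_eq] at *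
    push_cast at ih ⊢
    split_ifs <;> omega

lemma A_loop (l : List Int) (m : Nat) :
    (PySem.List.pyRange 0 (m : Int) 1).foldl
      (fun (st : List Int × Int) i =>
        let num : Int :=
          if l.contains i then st.2 + (PySem.List.count l i : Int) else st.2
        (st.1 ++ [num], num)) ([], 0)
    = ((List.range m).map (fun (k : Nat) => cntLt l ((k : Int) + 1)), cntLt l (m : Int)) := by
  induction m with
  | zero =>
    rw [PySem.List.pyRange_one_eq_nil (by omega)]
    simp [cntLt_zero]
  | succ m ih =>
    have hc : ((m + 1 : Nat) : Int) = (m : Int) + 1 := by push_cast; ring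
    rw [hc, PySem.List.pyRange_one_succ_right (by positivity), List.foldl_append, ih]
    simp only [List.foldl_cons, List.foldl_nil, List.range_succ, List.map_append, List.map_cons,
      List.map_nil]
    simp
    rw [cnt_succ l ((m : Nat) : Int) (by positivity)]
    by_cases h : ((m : Nat) : Int) ∈ l
    · rw [if_pos h]
    · rw [if_neg h, List.count_eq_zero.mpr h]
      simp

-- countP of a list whose indices below j satisfy p and from j on do not, equals j
lemma countP_of_split (p : Int → Bool) : ∀ (a : List Int) (j : Nat), j ≤ a.length →
    (∀ (k : Nat) (h : k < a.length), k < j → p a[k]) →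
    (∀ (k : Nat) (h : k < a.length), j ≤ k → ¬ p a[k]) →
    a.countP p = j := by
  intro a
  induction a with
  | nil =>
    intro j hj _ _
    simp only [List.length_nil, Nat.le_zero] at hj
    simp [hj]
  | cons v t ih =>
    intro j hj h1 h2
    cases j with
    | zero =>
      rw [List.countP_eq_zero.mpr]
      intro x hx
      obtain ⟨k, hk, rfl⟩ := List.mem_iff_getElem.mp hx
      exact h2 k hk (Nat.zero_le _)
    | succ m =>
      have hv : p v := h1 0 (by simp) (by omega)
      rw [List.countP_cons, if_pos hv]
      have := ih m (by simpa using hj)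
        (fun k hk hkm => h1 (k + 1) (by simpa using hk) (by omega))
        (fun k hk hmk => h2 (k + 1) (by simpa using hk) (by omega))
      omega

lemma sorted_getElem_mono (a : List Int) (hs : a.Pairwise (· ≤ ·))
    {i j : Nat} (hij : i ≤ j) (hj : j < a.length) : a[i]'(by omega) ≤ a[j] := by
  rcases Nat.lt_or_ge i j with h | h
  · exact List.pairwise_iff_getElem.mp hs i j (by omega) hj h
  · have : i = j := by omega
    subst this; exact le_refl _

-- pvBisectRight on a sorted list counts the elements ≤ x
lemma bisectRight_eq (a : List Int) (x : Int) (hs : a.Pairwise (· ≤ ·)) :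
    ∀ (n lo hi : Nat), hi ≤ a.length → lo ≤ hi → hi - lo ≤ n →
    (∀ (k : Nat) (h : k < a.length), k < lo → a[k] ≤ x) →
    (∀ (k : Nat) (h : k < a.length), hi ≤ k → x < a[k]) →
    pvBisectRight a x lo hi = a.countP (fun v => decide (v ≤ x)) := by
  intro n
  induction n with
  | zero =>
    intro lo hi hhi hlh hn h1 h2
    have : lo = hi := by omega
    subst this
    rw [pvBisectRight, if_neg (by omega)]
    exact (countP_of_split _ a lo hhi
      (fun k h hk => by simpa using h1 k h hk)
      (fun k h hk => by simpa using not_le.mpr (h2 k h hk))).symm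
  | succ m ih =>
    intro lo hi hhi hlh hn h1 h2
    by_cases hlt : lo < hi
    · rw [pvBisectRight, if_pos hlt]
      have hmid : (lo + hi) / 2 < a.length := by omega
      have hgetD : a.getD ((lo + hi) / 2) 0 = a[(lo + hi) / 2] := List.getD_eq_getElem a 0 hmid
      by_cases hc : x < a.getD ((lo + hi) / 2) 0
      · rw [if_pos hc]
        exact ih lo ((lo + hi) / 2) (by omega) (by omega) (by omega) h1
          (fun k h hk => lt_of_lt_of_le (hgetD ▸ hc) (sorted_getElem_mono a hs hk h))
      · rw [if_neg hc]
        exact ih ((lo + hi) / 2 + 1) hi (by omega) (by omega) (by omega)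
          (fun k h hk => le_trans (sorted_getElem_mono a hs (show k ≤ (lo + hi) / 2 by omega) hmid)
            (by rw [← hgetD]; omega)) h2
    · have : lo = hi := by omega
      subst this
      rw [pvBisectRight, if_neg (by omega)]
      exact (countP_of_split _ a lo hhi
        (fun k h hk => by simpa using h1 k h hk)
        (fun k h hk => by simpa using not_le.mpr (h2 k h hk))).symm

-- pvBisectLeft on a sorted list counts the elements < x
lemma bisectLeft_eq (a : List Int) (x : Int) (hs : a.Pairwise (· ≤ ·)) :
    ∀ (n lo hi : Nat), hi ≤ a.length → lo ≤ hi → hi - lo ≤ n →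
    (∀ (k : Nat) (h : k < a.length), k < lo → a[k] < x) →
    (∀ (k : Nat) (h : k < a.length), hi ≤ k → x ≤ a[k]) →
    pvBisectLeft a x lo hi = a.countP (fun v => decide (v < x)) := by
  intro n
  induction n with
  | zero =>
    intro lo hi hhi hlh hn h1 h2
    have : lo = hi := by omega
    subst this
    rw [pvBisectLeft, if_neg (by omega)]
    exact (countP_of_split _ a lo hhi
      (fun k h hk => by simpa using h1 k h hk)
      (fun k h hk => by simpa using not_lt.mpr (h2 k h hk))).symm
  | succ m ih =>
    intro lo hi hhi hlh hn h1 h2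
    by_cases hlt : lo < hi
    · rw [pvBisectLeft, if_pos hlt]
      have hmid : (lo + hi) / 2 < a.length := by omega
      have hgetD : a.getD ((lo + hi) / 2) 0 = a[(lo + hi) / 2] := List.getD_eq_getElem a 0 hmid
      by_cases hc : a.getD ((lo + hi) / 2) 0 < x
      · rw [if_pos hc]
        exact ih ((lo + hi) / 2 + 1) hi (by omega) (by omega) (by omega)
          (fun k h hk => lt_of_le_of_lt
            (sorted_getElem_mono a hs (show k ≤ (lo + hi) / 2 by omega) hmid)
            (hgetD ▸ hc)) h2
      · rw [if_neg hc]
        exact ih lo ((lo + hi) / 2) (by omega) (by omega) (by omega) h1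
          (fun k h hk => le_trans (by rw [← hgetD]; omega)
            (sorted_getElem_mono a hs hk h))
    · have : lo = hi := by omega
      subst this
      rw [pvBisectLeft, if_neg (by omega)]
      exact (countP_of_split _ a lo hhi
        (fun k h hk => by simpa using h1 k h hk)
        (fun k h hk => by simpa using not_lt.mpr (h2 k h hk))).symm

-- count(≤ k) − count(< 0) = count(0 ≤ · < k+1), for k ≥ 0
lemma count_split (l : List Int) (k : Nat) :
    l.countP (fun v => decide (v ≤ (k : Int)))
      = l.countP (fun v => decide (v < 0)) + l.countP (fun v => decide (0 ≤ v ∧ v < (k : Int) + 1)) := by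
  induction l with
  | nil => simp
  | cons a t ih =>
    simp only [List.countP_cons, decide_eq_true_eq] at *
    split_ifs <;> omega

-- ===== VERDICT (by name: the statement is the Claim_ definition above) =====
theorem get_accumulate_bug_num_spec : Claim_equal_get_accumulate_bug_num := by
  intro l t _
  unfold Spec_get_accumulate_bug_num get_accumulate_bug_num get_accumulate_bug_num_alt
  dsimp only
  set s := PySem.List.sorted l (fun v => v) false with hsdef
  have hperm : s.Perm l := PySem.List.sorted_perm l (fun v => v) false
  have hsort : s.Pairwise (· ≤ ·) := by
    simpa using PySem.List.sorted_pairwise l (fun v => v)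
  by_cases ht : t ≤ 0
  · rw [PySem.List.pyRange_one_eq_nil ht]
    simp
  · obtain ⟨nn, rfl⟩ : ∃ nn : Nat, t = (nn : Int) := ⟨t.toNat, by omega⟩
    rw [A_loop l nn]
    rw [show PySem.List.pyRange 0 ((nn : Nat) : Int) 1
        = (List.range nn).map (fun (k : Nat) => ((k : Nat) : Int)) by
      rw [PySem.List.pyRange_one]
      simp]
    rw [List.map_map]
    apply List.map_congr_left
    intro k _
    simp only [Function.comp_apply]
    rw [bisectRight_eq s ((k : Nat) : Int) hsort s.length 0 s.length le_rfl (by omega) le_rfl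
        (by omega) (by omega),
      bisectLeft_eq s 0 hsort s.length 0 s.length le_rfl (by omega) le_rfl (by omega) (by omega)]
    rw [hperm.countP_eq, hperm.countP_eq]
    have := count_split l k
    unfold cntLt
    omega
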